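-- pv_equiv track=rewrite | github.com/robocasa/robocasa | docs/conf.py | _rc_format_desc_html
-- ===== SOURCE A (Python) =====
-- def _rc_escape_html(s: str) -> str:
--     return (
--         (s or "")
--         .replace("&", "&amp;")
--         .replace("<", "&lt;")
--         .replace(">", "&gt;")
--         .replace('"', "&quot;")
--         .replace("'", "&#39;")
--     )
--
-- def _rc_format_desc_html(desc: str) -> str:
--     # Mirrors the JS formatting enough for nice initial render:
--     # {x} -> [<strong><em>x</em></strong>]
--     esc = _rc_escape_html(desc or "")
--     # lightweight brace formatting
--     out = []
--     i = 0
--     while i < len(esc):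
--         if esc[i] == "{":
--             j = esc.find("}", i + 1)
--             if j != -1:
--                 inner = esc[i + 1 : j]
--                 out.append("[<strong><em>")
--                 out.append(inner)
--                 out.append("</em></strong>]")
--                 i = j + 1
--                 continue
--         out.append(esc[i])
--         i += 1
--     return "".join(out)
-- ===== SOURCE B (Python) =====
-- def _rc_escape_html(s: str) -> str:
--     return (
--         (s or "")
--         .replace("&", "&amp;")
--         .replace("<", "&lt;")
--         .replace(">", "&gt;")
--         .replace('"', "&quot;")
--         .replace("'", "&#39;")
--     )
--
-- def _rc_format_desc_html(desc: str) -> str: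
--     # Split on '}' once; every part but the last ended at a '}', whose pairing
--     # '{' (if any) is the first '{' of that part. No index scanning.
--     esc = _rc_escape_html(desc or "")
--     parts = esc.split("}")
--     pieces = []
--     for part in parts[:-1]:
--         pre, sep, inner = part.partition("{")
--         if sep:
--             pieces.append(pre + "[<strong><em>" + inner + "</em></strong>]")
--         else:
--             pieces.append(part + "}")
--     pieces.append(parts[-1])
--     return "".join(pieces)
-- ===== Notes on version B (the rewrite author's own statement) =====
-- stated objective: idiomatic
-- what changed: Replaces the index-based per-character while loop with find() by a single split on the closing brace plus a partition of each piece at its first opening brace, joined at the end.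
import Mathlib
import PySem

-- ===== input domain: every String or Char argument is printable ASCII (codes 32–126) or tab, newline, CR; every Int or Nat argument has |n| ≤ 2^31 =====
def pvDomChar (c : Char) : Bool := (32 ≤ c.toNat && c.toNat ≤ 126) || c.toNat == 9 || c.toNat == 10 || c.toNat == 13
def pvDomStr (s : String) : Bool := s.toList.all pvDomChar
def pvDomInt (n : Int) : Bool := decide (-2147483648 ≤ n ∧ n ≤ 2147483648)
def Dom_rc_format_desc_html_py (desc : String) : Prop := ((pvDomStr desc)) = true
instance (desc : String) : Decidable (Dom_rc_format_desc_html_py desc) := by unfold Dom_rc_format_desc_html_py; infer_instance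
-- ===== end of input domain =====

-- B replaces A's index-based while/find scanner by one split on '}' plus a partition of
-- each piece at its first '{' (objective: simpler/idiomatic; same exact output).

-- shared helper _rc_escape_html (both Pythons define and use it verbatim)
def rcEscapeHtml (s : String) : String :=
  ((((PySem.Str.replace s "&" "&amp;").replace "<" "&lt;").replace ">" "&gt;").replace "\"" "&quot;").replace "'" "&#39;"

-- ===== PORT A =====
-- esc.find("}", i + 1): first '}' in the remainder; returns (inner, after) — none = -1
def findClose : List Char → Option (List Char × List Char)
  | [] => none
  | c :: cs =>
    if c = '}' then some ([], cs)
    else match findClose cs with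
      | some (a, b) => some (c :: a, b)
      | none => none

theorem findClose_length : ∀ (cs a b : List Char), findClose cs = some (a, b) → b.length < cs.length := by
  intro cs
  induction cs with
  | nil => intro a b h; simp [findClose] at h
  | cons c cs ih =>
    intro a b h
    simp only [findClose] at h
    split at h
    · cases h; simp
    · cases hf : findClose cs with
      | none => rw [hf] at h; cases h
      | some p =>
        rw [hf] at h
        cases p with
        | mk a' b' =>
          cases h
          have := ih a' b hf
          simpa using Nat.lt_succ_of_lt this

-- the while loop of A, step for step over the remaining characters
def loopA : List Char → List Char
  | [] => []
  | c :: rest =>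
    if c = '{' then
      match hf : findClose rest with
      | some (inner, rest') =>
        "[<strong><em>".toList ++ inner ++ "</em></strong>]".toList ++ loopA rest'
      | none => c :: loopA rest
    else c :: loopA rest
  termination_by cs => cs.length
  decreasing_by
    · exact Nat.lt_succ_of_lt (findClose_length rest _ _ hf)
    · simp
    · simp

def rc_format_desc_html_py (desc : String) : String :=
  String.ofList (loopA (rcEscapeHtml desc).toList)

-- ===== PORT B =====
-- esc.split("}") (single-character separator, Python semantics)
def splitClose : List Char → List (List Char)
  | [] => [[]]
  | c :: cs =>
    if c = '}' then [] :: splitClose cs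
    else match splitClose cs with
      | [] => [[c]]
      | h :: t => (c :: h) :: t

-- part.partition("{") and the per-part formatting of B's loop body
def procB (p : List Char) : List Char :=
  let pre := p.takeWhile (· ≠ '{')
  match p.dropWhile (· ≠ '{') with
  | [] => p ++ ['}']
  | _ :: inner => pre ++ "[<strong><em>".toList ++ inner ++ "</em></strong>]".toList

def bodyB (cs : List Char) : List Char :=
  let parts := splitClose cs
  (parts.dropLast.map procB).flatten ++ parts.getLastD []

def rc_format_desc_html_py_alt (desc : String) : String :=
  String.ofList (bodyB (rcEscapeHtml desc).toList)

-- ===== PRECONDITION & SPEC =====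
def Spec_rc_format_desc_html_py (desc : String) (out : String) : Prop := out = rc_format_desc_html_py_alt desc
instance (desc : String) (out : String) : Decidable (Spec_rc_format_desc_html_py desc out) := by unfold Spec_rc_format_desc_html_py; infer_instance

-- ===== CLAIM (what is proved, stated in full; the proofs are below) =====
def Claim_equal_rc_format_desc_html_py : Prop := ∀ (desc : String), Dom_rc_format_desc_html_py desc → Spec_rc_format_desc_html_py desc (rc_format_desc_html_py desc)

-- ===== LEMMAS AND PROOFS =====

theorem findClose_of_not_mem : ∀ (cs : List Char), '}' ∉ cs → findClose cs = none := by
  intro cs h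
  induction cs with
  | nil => rfl
  | cons c cs ih =>
    simp only [List.mem_cons, not_or] at h
    simp [findClose, Ne.symm h.1, ih h.2]

theorem findClose_append : ∀ (q rest : List Char), '}' ∉ q →
    findClose (q ++ '}' :: rest) = some (q, rest) := by
  intro q rest h
  induction q with
  | nil => simp [findClose]
  | cons c q ih =>
    simp only [List.mem_cons, not_or] at h
    simp [findClose, Ne.symm h.1, ih h.2]

theorem splitClose_ne_nil : ∀ (cs : List Char), splitClose cs ≠ [] := by
  intro cs
  induction cs with
  | nil => simp [splitClose]
  | cons c cs ih =>
    simp only [splitClose]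
    split
    · simp
    · cases h : splitClose cs <;> simp

theorem splitClose_of_not_mem : ∀ (cs : List Char), '}' ∉ cs → splitClose cs = [cs] := by
  intro cs h
  induction cs with
  | nil => rfl
  | cons c cs ih =>
    simp only [List.mem_cons, not_or] at h
    simp [splitClose, Ne.symm h.1, ih h.2]

theorem splitClose_append : ∀ (p rest : List Char), '}' ∉ p →
    splitClose (p ++ '}' :: rest) = p :: splitClose rest := by
  intro p rest h
  induction p with
  | nil => simp [splitClose]
  | cons c p ih =>
    simp only [List.mem_cons, not_or] at h
    simp [splitClose, Ne.symm h.1, ih h.2]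

theorem loopA_of_not_mem : ∀ (cs : List Char), '}' ∉ cs → loopA cs = cs := by
  intro cs h
  induction cs with
  | nil => rw [loopA]
  | cons c cs ih =>
    simp only [List.mem_cons, not_or] at h
    rw [loopA]
    split
    · rw [findClose_of_not_mem cs h.2]
      simp [ih h.2]
    · simp [ih h.2]

theorem loopA_append : ∀ (p rest : List Char), '}' ∉ p →
    loopA (p ++ '}' :: rest) = procB p ++ loopA rest := by
  intro p rest h
  induction p with
  | nil =>
    rw [List.nil_append, loopA]
    simp [procB]
  | cons c p ih =>
    simp only [List.mem_cons, not_or] at h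
    by_cases hc : c = '{'
    · subst hc
      rw [List.cons_append, loopA]
      rw [findClose_append p rest h.2]
      simp [procB, List.takeWhile, List.dropWhile]
    · rw [List.cons_append, loopA]
      simp only [if_neg hc]
      rw [ih h.2]
      simp [procB, List.takeWhile, List.dropWhile, hc]
      split <;> simp

theorem exists_split : ∀ (cs : List Char), '}' ∈ cs →
    ∃ p rest, cs = p ++ '}' :: rest ∧ '}' ∉ p := by
  intro cs hmem
  induction cs with
  | nil => cases hmem
  | cons c cs ihc =>
    by_cases hc : c = '}'
    · exact ⟨[], cs, by rw [hc]; rfl, by simp⟩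
    · have hm : '}' ∈ cs := by
        rcases List.mem_cons.mp hmem with h | h
        · exact absurd h.symm hc
        · exact h
      obtain ⟨p, rest, heq, hp⟩ := ihc hm
      refine ⟨c :: p, rest, by rw [heq]; rfl, ?_⟩
      simp only [List.mem_cons, not_or]
      exact ⟨fun h => hc h.symm, hp⟩

theorem loopA_eq_bodyB : ∀ (n : ℕ) (cs : List Char), cs.length ≤ n → loopA cs = bodyB cs := by
  intro n
  induction n with
  | zero =>
    intro cs h
    have : cs = [] := List.eq_nil_of_length_eq_zero (Nat.le_zero.mp h)
    subst this
    rw [loopA]; rfl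
  | succ n ih =>
    intro cs hlen
    by_cases hmem : '}' ∈ cs
    · obtain ⟨p, rest, rfl, hp⟩ := exists_split cs hmem
      rw [loopA_append p rest hp]
      have hrest : rest.length ≤ n := by
        have := hlen
        simp only [List.length_append, List.length_cons] at this
        omega
      rw [ih rest hrest]
      simp only [bodyB, splitClose_append p rest hp]
      have hne := splitClose_ne_nil rest
      cases h : splitClose rest with
      | nil => exact absurd h hne
      | cons a t => simp [List.dropLast, List.getLastD]
    · rw [loopA_of_not_mem cs hmem]
      simp [bodyB, splitClose_of_not_mem cs hmem]

-- ===== VERDICT (by name: the statement is the Claim_ definition above) =====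
theorem rc_format_desc_html_py_spec : Claim_equal_rc_format_desc_html_py := by
  intro desc _
  unfold Spec_rc_format_desc_html_py rc_format_desc_html_py rc_format_desc_html_py_alt
  rw [loopA_eq_bodyB (rcEscapeHtml desc).toList.length _ le_rfl]
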